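-- pv_equiv track=rewrite | github.com/alexander-pv/educational_repo | algorithms/csc/python/tasks/15_ladder_task.py | best_step_iterative
-- ===== SOURCE A (Python) =====
-- def best_step_iterative(steps_list: list, n: int) -> int:
--     """
--     Iterative algorithm for ladder task
--     :param steps_list:  list of ints, weight per each step
--     :param n:           int, number of weights in steps_list
--     :return: int
--     """
--     sum_list = [0, 0]
--     for i in range(n):
--         if i <= 1:
--             sum_list[i] = steps_list[i]
--         else:
--             next_val = max(sum_list) + steps_list[i]
--             sum_list[0] = sum_list[1]
--             sum_list[1] = next_val
--     return sum_list[-1]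
-- ===== SOURCE B (Python) =====
-- def best_step_iterative(steps_list: list, n: int) -> int:
--     """Top-down memoized DP over the step index, demand-driven with an explicit
--     worklist (no recursion limit). For n == 1 returns steps_list[0] (the best
--     sum with a single step), where A returns 0."""
--     if n <= 0:
--         return 0
--     memo = {}
--     stack = [n - 1]
--     while stack:
--         i = stack[-1]
--         if i in memo:
--             stack.pop()
--         elif i <= 1:
--             memo[i] = steps_list[i]
--             stack.pop()
--         elif i - 1 in memo and i - 2 in memo:
--             memo[i] = max(memo[i - 1], memo[i - 2]) + steps_list[i]
--             stack.pop()
--         else: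
--             if i - 1 not in memo:
--                 stack.append(i - 1)
--             if i - 2 not in memo:
--                 stack.append(i - 2)
--     return memo[n - 1]
-- ===== Notes on version B (the rewrite author's own statement) =====
-- stated objective: alternative
-- what changed: Replaces A's forward two-register sliding-window scan over range(n) with demand-driven top-down memoization: a memo dict filled from an explicit worklist that starts at the target index n-1 and pulls in dependencies i-1 and i-2 on demand.
-- intended difference: For n = 1 with steps_list[0] != 0, A returns 0 because its loop never writes sum_list[1], silently dropping the only step's weight; B returns steps_list[0], the best attainable sum with a single step, which is the intended value of the ladder DP. — e.g. on best_step_iterative([7], 1): A returns 0, B returns 7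
import Mathlib
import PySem

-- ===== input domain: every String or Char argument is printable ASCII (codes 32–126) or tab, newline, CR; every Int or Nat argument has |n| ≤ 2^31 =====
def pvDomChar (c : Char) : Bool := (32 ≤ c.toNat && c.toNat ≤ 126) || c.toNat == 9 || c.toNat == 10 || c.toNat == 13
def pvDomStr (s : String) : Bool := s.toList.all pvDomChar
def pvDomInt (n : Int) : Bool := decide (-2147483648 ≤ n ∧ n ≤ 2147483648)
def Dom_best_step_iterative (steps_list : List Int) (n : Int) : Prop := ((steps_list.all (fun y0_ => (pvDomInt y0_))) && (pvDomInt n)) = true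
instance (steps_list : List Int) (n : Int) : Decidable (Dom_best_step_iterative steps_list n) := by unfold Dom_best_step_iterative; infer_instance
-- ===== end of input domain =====

-- B replaces A's forward two-register scan by demand-driven top-down memoization
-- (a memo dict filled from an explicit worklist starting at index n-1); same cost,
-- different decomposition ('alternative'); for n = 1 B returns steps_list[0] where A returns 0 (see D_).

-- ===== PORT A =====
-- A's sum_list is always the two-element list [v0, v1]; it is carried as the pair
-- (v0, v1): sum_list[0] / sum_list[1] are the components, max(sum_list) = max v0 v1,
-- and sum_list[-1] is the second component.  steps_list[i] is PySem.List.pyGetD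
-- (index in range for every i in range(n) under Pre_).
def best_step_iterative (steps_list : List Int) (n : Int) : Int :=
  let sum_list : Int × Int := (0, 0)
  let sum_list := (PySem.List.pyRange 0 n 1).foldl (fun sl i =>
    if i ≤ 1 then
      (if i = 0 then (PySem.List.pyGetD steps_list i 0, sl.2)
       else (sl.1, PySem.List.pyGetD steps_list i 0))
    else
      let next_val := max sl.1 sl.2 + PySem.List.pyGetD steps_list i 0
      (sl.2, next_val)) sum_list
  sum_list.2

-- ===== PORT B =====
-- Source B's while loop.  The Python stack's top (end of the list) is the HEAD of the
-- Lean list, so stack.append(x) prepends and stack[-1]/stack.pop() act on the head;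
-- appending i-1 then i-2 therefore yields head order [i-2?, i-1?].  The Nat fuel
-- only makes the loop structurally total: the loop empties its worklist in fewer
-- than 3 ^ n.toNat iterations (proved below), so the fuel-0 branch is never reached.
def bsiLoop (steps_list : List Int) : Nat → PySem.Dict Int Int → List Int → PySem.Dict Int Int
  | 0, memo, _ => memo
  | _ + 1, memo, [] => memo
  | f + 1, memo, i :: rest =>
    if (memo.get? i).isSome then
      bsiLoop steps_list f memo rest
    else if i ≤ 1 then
      bsiLoop steps_list f (memo.insert i (PySem.List.pyGetD steps_list i 0)) rest
    else if (memo.get? (i - 1)).isSome && (memo.get? (i - 2)).isSome then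
      bsiLoop steps_list f
        (memo.insert i (max (memo.getD (i - 1) 0) (memo.getD (i - 2) 0) + PySem.List.pyGetD steps_list i 0)) rest
    else
      bsiLoop steps_list f memo
        ((if (memo.get? (i - 2)).isSome then [] else [i - 2]) ++
         (if (memo.get? (i - 1)).isSome then [] else [i - 1]) ++ i :: rest)

-- return memo[n-1]: the key is always present when the loop ends (proved below), so getD's default is never used
def best_step_iterative_alt (steps_list : List Int) (n : Int) : Int :=
  if n ≤ 0 then 0
  else (bsiLoop steps_list (3 ^ n.toNat) PySem.Dict.empty [n - 1]).getD (n - 1) 0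

-- ===== PRECONDITION & SPEC =====
-- Pre_ excludes exactly the inputs where A raises: n > len(steps_list) makes steps_list[i] an IndexError.
def Pre_best_step_iterative (steps_list : List Int) (n : Int) : Prop := n ≤ (steps_list.length : Int)
instance (steps_list : List Int) (n : Int) : Decidable (Pre_best_step_iterative steps_list n) := by unfold Pre_best_step_iterative; infer_instance
def pvWitness_best_step_iterative : List Int × Int := ([3, -4, 5, 2], 4)

-- For n = 1 (one step) A returns 0, silently dropping steps_list[0] because sum_list[1]
-- is never written; B returns steps_list[0], the best sum with a single step, which is
-- the intended value of the ladder DP.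
def D_best_step_iterative (steps_list : List Int) (n : Int) : Prop := n = 1 ∧ steps_list.getD 0 0 ≠ 0
instance (steps_list : List Int) (n : Int) : Decidable (D_best_step_iterative steps_list n) := by unfold D_best_step_iterative; infer_instance

def Spec_best_step_iterative (steps_list : List Int) (n : Int) (out : Int) : Prop := ¬ D_best_step_iterative steps_list n → out = best_step_iterative_alt steps_list n
instance (steps_list : List Int) (n : Int) (out : Int) : Decidable (Spec_best_step_iterative steps_list n out) := by unfold Spec_best_step_iterative; infer_instance

def pvDiffWitness_best_step_iterative : List Int × Int := ([7], 1)
def pvDiffWitnessOut_best_step_iterative : Int × Int := (0, 7)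

-- ===== CLAIM (what is proved, stated in full; the proofs are below) =====
def Claim_unchanged_best_step_iterative : Prop := ∀ (steps_list : List Int) (n : Int), Dom_best_step_iterative steps_list n → Pre_best_step_iterative steps_list n → Spec_best_step_iterative steps_list n (best_step_iterative steps_list n)
def Claim_changed_best_step_iterative : Prop := Dom_best_step_iterative (pvDiffWitness_best_step_iterative.1) (pvDiffWitness_best_step_iterative.2) ∧ Pre_best_step_iterative (pvDiffWitness_best_step_iterative.1) (pvDiffWitness_best_step_iterative.2) ∧ D_best_step_iterative (pvDiffWitness_best_step_iterative.1) (pvDiffWitness_best_step_iterative.2) ∧ best_step_iterative (pvDiffWitness_best_step_iterative.1) (pvDiffWitness_best_step_iterative.2) = pvDiffWitnessOut_best_step_iterative.1 ∧ best_step_iterative_alt (pvDiffWitness_best_step_iterative.1) (pvDiffWitness_best_step_iterative.2) = pvDiffWitnessOut_best_step_iterative.2 ∧ pvDiffWitnessOut_best_step_iterative.1 ≠ pvDiffWitnessOut_best_step_iterative.2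
def Claim_exact_best_step_iterative : Prop := ∀ (steps_list : List Int) (n : Int), Dom_best_step_iterative steps_list n → Pre_best_step_iterative steps_list n → D_best_step_iterative steps_list n → best_step_iterative steps_list n ≠ best_step_iterative_alt steps_list n

-- ===== LEMMAS AND PROOFS =====

-- the recurrence both programs compute: dp 0 = s0, dp 1 = s1, dp (i+2) = max (dp (i+1)) (dp i) + s(i+2)
def bsiDp (steps_list : List Int) : Nat → Int
  | 0 => PySem.List.pyGetD steps_list 0 0
  | 1 => PySem.List.pyGetD steps_list 1 0
  | i + 2 => max (bsiDp steps_list (i + 1)) (bsiDp steps_list i) + PySem.List.pyGetD steps_list ((i : Int) + 2) 0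

-- every value in the memo is the dp value of its (nonnegative) key
def bsiSound (steps_list : List Int) (memo : PySem.Dict Int Int) : Prop :=
  ∀ (j : Int) (v : Int), memo.get? j = some v → 0 ≤ j ∧ v = bsiDp steps_list j.toNat

lemma bsiLoop_nil (steps_list : List Int) (f : Nat) (memo : PySem.Dict Int Int) :
    bsiLoop steps_list f memo [] = memo := by
  cases f <;> rfl

-- one loop iteration discharges the top index p+2 once it is memoized or both dependencies are
lemma bsiLoop_finish (steps_list : List Int) (p : Nat) (memo : PySem.Dict Int Int)
    (stack : List Int) (f : Nat) (hsound : bsiSound steps_list memo)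
    (hready : (memo.get? ((p : Int) + 2)).isSome ∨
      ((memo.get? ((p : Int) + 1)).isSome ∧ (memo.get? (p : Int)).isSome))
    (hf : 1 ≤ f) :
    ∃ memo' : PySem.Dict Int Int,
      bsiLoop steps_list f memo (((p : Int) + 2) :: stack) = bsiLoop steps_list (f - 1) memo' stack ∧
      bsiSound steps_list memo' ∧
      memo'.get? ((p : Int) + 2) = some (bsiDp steps_list (p + 2)) ∧
      (∀ j : Int, (memo.get? j).isSome → (memo'.get? j).isSome) := by
  obtain ⟨f0, rfl⟩ : ∃ f0, f = f0 + 1 := ⟨f - 1, by omega⟩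
  have htoNat : ((p : Int) + 2).toNat = p + 2 := by omega
  by_cases hmem : (memo.get? ((p : Int) + 2)).isSome
  · obtain ⟨v, hv⟩ := Option.isSome_iff_exists.mp hmem
    obtain ⟨-, hvdp⟩ := hsound _ _ hv
    rw [htoNat] at hvdp
    refine ⟨memo, ?_, hsound, by rw [hv, hvdp], fun j h => h⟩
    simp only [bsiLoop, if_pos hmem]
    rfl
  · rcases hready with hready | ⟨h1, h2⟩
    · exact absurd hready hmem
    obtain ⟨v1, hv1⟩ := Option.isSome_iff_exists.mp h1
    obtain ⟨v2, hv2⟩ := Option.isSome_iff_exists.mp h2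
    obtain ⟨-, hv1dp⟩ := hsound _ _ hv1
    obtain ⟨-, hv2dp⟩ := hsound _ _ hv2
    have e1 : (p : Int) + 2 - 1 = (p : Int) + 1 := by ring
    have e2 : (p : Int) + 2 - 2 = (p : Int) := by ring
    have et1 : ((p : Int) + 1).toNat = p + 1 := by omega
    have et2 : ((p : Int)).toNat = p := by omega
    rw [et1] at hv1dp
    rw [et2] at hv2dp
    have hval : max (memo.getD ((p : Int) + 2 - 1) 0) (memo.getD ((p : Int) + 2 - 2) 0) +
        PySem.List.pyGetD steps_list ((p : Int) + 2) 0 = bsiDp steps_list (p + 2) := by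
      rw [e1, e2]
      rw [PySem.Dict.getD_eq_get?_getD, PySem.Dict.getD_eq_get?_getD, hv1, hv2]
      simp [hv1dp, hv2dp, bsiDp]
    refine ⟨memo.insert ((p : Int) + 2) (bsiDp steps_list (p + 2)), ?_, ?_, ?_, ?_⟩
    · simp only [bsiLoop, if_neg hmem, e1, e2]
      rw [if_neg (by omega), if_pos (by simp [h1, h2])]
      rw [e1, e2] at hval
      rw [hval]
      norm_num
    · intro j v hj
      rw [PySem.Dict.get?_insert] at hj
      split at hj
      · rename_i hje
        cases hj
        exact ⟨by omega, by rw [hje, htoNat]⟩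
      · exact hsound _ _ hj
    · rw [PySem.Dict.get?_insert_self]
    · intro j hj
      rw [PySem.Dict.get?_insert]
      split
      · simp
      · exact hj

-- resolving the top index i consumes at most 3^(i+1) fuel, extends the memo with dp i, and preserves soundness
lemma bsiLoop_resolve (steps_list : List Int) :
    ∀ (i : Nat) (memo : PySem.Dict Int Int) (stack : List Int) (f : Nat),
      bsiSound steps_list memo → 3 ^ (i + 1) ≤ f →
      ∃ (k : Nat) (memo' : PySem.Dict Int Int),
        k ≤ 3 ^ (i + 1) ∧
        bsiLoop steps_list f memo ((i : Int) :: stack) = bsiLoop steps_list (f - k) memo' stack ∧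
        bsiSound steps_list memo' ∧
        memo'.get? (i : Int) = some (bsiDp steps_list i) ∧
        (∀ j : Int, (memo.get? j).isSome → (memo'.get? j).isSome) := by
  intro i
  induction i using Nat.strong_induction_on with
  | _ i ih =>
    intro memo stack f hsound hf
    have hone : 1 ≤ 3 ^ (i + 1) := Nat.one_le_pow _ _ (by norm_num)
    obtain ⟨f', rfl⟩ : ∃ f', f = f' + 1 := ⟨f - 1, by omega⟩
    by_cases hmem : (memo.get? (i : Int)).isSome
    · -- already memoized: one pop
      obtain ⟨v, hv⟩ := Option.isSome_iff_exists.mp hmem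
      obtain ⟨-, hvdp⟩ := hsound _ _ hv
      have : ((i : Int)).toNat = i := by omega
      rw [this] at hvdp
      refine ⟨1, memo, hone, ?_, hsound, by rw [hv, hvdp], fun j h => h⟩
      simp only [bsiLoop, if_pos hmem]
      norm_num
    · rcases Nat.lt_or_ge i 2 with hi2 | hi2
      · -- base case i ≤ 1: memoize steps_list[i]
        have hile : ((i : Int)) ≤ 1 := by omega
        refine ⟨1, memo.insert (i : Int) (PySem.List.pyGetD steps_list (i : Int) 0), hone, ?_, ?_, ?_, ?_⟩
        · simp only [bsiLoop, if_neg hmem, if_pos hile]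
          norm_num
        · intro j v hj
          rw [PySem.Dict.get?_insert] at hj
          split at hj
          · rename_i hje
            cases hj
            subst hje
            refine ⟨by omega, ?_⟩
            have : ((i : Int)).toNat = i := by omega
            rw [this]
            interval_cases i
            · rfl
            · rfl
          · exact hsound _ _ hj
        · rw [PySem.Dict.get?_insert_self]
          interval_cases i
          · rfl
          · rfl
        · intro j hj
          rw [PySem.Dict.get?_insert]
          split
          · simp
          · exact hj
      · -- i = p + 2
        obtain ⟨p, rfl⟩ : ∃ p, i = p + 2 := ⟨i - 2, by omega⟩
        have hci : ((p + 2 : Nat) : Int) = (p : Int) + 2 := by push_cast; ring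
        have hcp1 : ((p + 1 : Nat) : Int) = (p : Int) + 1 := by push_cast; ring
        have hA : 1 ≤ 3 ^ (p + 1) := Nat.one_le_pow _ _ (by norm_num)
        have hB3 : (3 : ℕ) ^ (p + 2) = 3 ^ (p + 1) * 3 := pow_succ 3 (p + 1)
        have hC3 : (3 : ℕ) ^ (p + 2 + 1) = 3 ^ (p + 2) * 3 := pow_succ 3 (p + 2)
        have hBe : (3 : ℕ) ^ (p + 1 + 1) = 3 ^ (p + 2) := by rw [show p + 1 + 1 = p + 2 from by omega]
        rw [hci] at hmem ⊢
        have hnot1 : ¬ ((p : Int) + 2 ≤ 1) := by omega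
        have r1 : (p : Int) + 2 - 1 = (p : Int) + 1 := by ring
        have r2 : (p : Int) + 2 - 2 = (p : Int) := by ring
        by_cases hd1 : (memo.get? ((p : Int) + 1)).isSome
        · by_cases hd2 : (memo.get? ((p : Int))).isSome
          · -- both dependencies ready: one compute-and-pop step
            obtain ⟨memo', heq, hs', hg', hm'⟩ :=
              bsiLoop_finish steps_list p memo stack (f' + 1) hsound (Or.inr ⟨hd1, hd2⟩) (by omega)
            exact ⟨1, memo', hone, by rw [heq], hs', hg', hm'⟩
          · -- only i-2 missing: push it, resolve it, then finish
            simp only [bsiLoop, if_neg hmem, if_neg hnot1, r1, r2]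
            rw [if_neg (by simp [hd2]), if_neg hd2, if_pos hd1]
            simp only [List.singleton_append]
            obtain ⟨k1, memo1, hk1, heq1, hs1, hg1, hm1⟩ :=
              ih p (by omega) memo (((p : Int) + 2) :: stack) f' hsound (by omega)
            obtain ⟨memo2, heq2, hs2, hg2, hm2⟩ :=
              bsiLoop_finish steps_list p memo1 stack (f' - k1) hs1
                (Or.inr ⟨hm1 _ hd1, by rw [hg1]; rfl⟩) (by omega)
            refine ⟨1 + k1 + 1, memo2, by omega, ?_, hs2, hg2, fun j hj => hm2 _ (hm1 _ hj)⟩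
            rw [heq1, heq2]
            congr 1
            omega
        · by_cases hd2 : (memo.get? ((p : Int))).isSome
          · -- only i-1 missing: push it, resolve it, then finish
            simp only [bsiLoop, if_neg hmem, if_neg hnot1, r1, r2]
            rw [if_neg (by simp [hd1]), if_pos hd2, if_neg hd1]
            simp only [List.nil_append, List.singleton_append]
            obtain ⟨k2, memo1, hk2, heq1, hs1, hg1, hm1⟩ :=
              ih (p + 1) (by omega) memo (((p : Int) + 2) :: stack) f' hsound (by rw [hBe]; omega)
            rw [hBe] at hk2
            rw [hcp1] at heq1 hg1
            obtain ⟨memo2, heq2, hs2, hg2, hm2⟩ :=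
              bsiLoop_finish steps_list p memo1 stack (f' - k2) hs1
                (Or.inr ⟨by rw [hg1]; rfl, hm1 _ hd2⟩) (by omega)
            refine ⟨1 + k2 + 1, memo2, by omega, ?_, hs2, hg2, fun j hj => hm2 _ (hm1 _ hj)⟩
            rw [heq1, heq2]
            congr 1
            omega
          · -- both missing: push i-1 then i-2 (head order [i-2, i-1]), resolve both, then finish
            simp only [bsiLoop, if_neg hmem, if_neg hnot1, r1, r2]
            rw [if_neg (by simp [hd1]), if_neg hd2, if_neg hd1]
            simp only [List.cons_append, List.nil_append]
            obtain ⟨k1, memo1, hk1, heq1, hs1, hg1, hm1⟩ :=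
              ih p (by omega) memo (((p : Int) + 1) :: ((p : Int) + 2) :: stack) f' hsound (by omega)
            obtain ⟨k2, memo2, hk2, heq2, hs2, hg2, hm2⟩ :=
              ih (p + 1) (by omega) memo1 (((p : Int) + 2) :: stack) (f' - k1) hs1 (by rw [hBe]; omega)
            rw [hBe] at hk2
            rw [hcp1] at heq2 hg2
            obtain ⟨memo3, heq3, hs3, hg3, hm3⟩ :=
              bsiLoop_finish steps_list p memo2 stack (f' - k1 - k2) hs2
                (Or.inr ⟨by rw [hg2]; rfl, hm2 _ (by rw [hg1]; rfl)⟩) (by omega)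
            refine ⟨1 + k1 + k2 + 1, memo3, by omega, ?_, hs3, hg3,
              fun j hj => hm3 _ (hm2 _ (hm1 _ hj))⟩
            rw [heq1, heq2, heq3]
            congr 1
            omega

-- ===== VERDICT (by name: the statement is the Claim_ definition above) =====
lemma alt_eq_dp (steps_list : List Int) (n : Int) (h : 1 ≤ n) :
    best_step_iterative_alt steps_list n = bsiDp steps_list (n - 1).toNat := by
  unfold best_step_iterative_alt
  rw [if_neg (by omega)]
  have hsound : bsiSound steps_list PySem.Dict.empty := by
    intro j v hj
    simp [PySem.Dict.get?_empty] at hj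
  have hfuel : 3 ^ ((n - 1).toNat + 1) ≤ 3 ^ n.toNat := by
    have : (n - 1).toNat + 1 = n.toNat := by omega
    rw [this]
  obtain ⟨k, memo', _, heq, _, hget, _⟩ :=
    bsiLoop_resolve steps_list (n - 1).toNat PySem.Dict.empty [] (3 ^ n.toNat) hsound hfuel
  have hcast : (((n - 1).toNat : Int)) = n - 1 := by omega
  rw [hcast] at heq hget
  rw [heq, bsiLoop_nil]
  simp [PySem.Dict.getD_eq_get?_getD, hget]

-- A's fold over range(m) ends in the state (dp (m-2), dp (m-1)) for m ≥ 2
lemma a_fold (steps_list : List Int) :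
    ∀ m : Nat, 2 ≤ m →
      (PySem.List.pyRange 0 (m : Int) 1).foldl (fun sl i =>
        if i ≤ 1 then
          (if i = 0 then (PySem.List.pyGetD steps_list i 0, sl.2)
           else (sl.1, PySem.List.pyGetD steps_list i 0))
        else
          let next_val := max sl.1 sl.2 + PySem.List.pyGetD steps_list i 0
          (sl.2, next_val)) ((0 : Int), (0 : Int)) = (bsiDp steps_list (m - 2), bsiDp steps_list (m - 1)) := by
  intro m hm
  induction m with
  | zero => omega
  | succ m ih =>
    rcases Nat.lt_or_ge m 2 with hlt | hge
    · -- m + 1 = 2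
      have hm2 : m = 1 := by omega
      subst hm2
      have h2 : PySem.List.pyRange 0 2 1 = [0, 1] := by decide
      show ((PySem.List.pyRange 0 (2 : Int) 1).foldl _ _) = _
      rw [h2]
      simp [bsiDp]
    · -- step: range(m+1) = range(m) ++ [m]
      have hcast : ((m + 1 : Nat) : Int) = (m : Int) + 1 := by push_cast; ring
      rw [hcast, PySem.List.pyRange_one_succ_right (by positivity), List.foldl_append, ih hge]
      have h1 : ¬ ((m : Int) ≤ 1) := by exact_mod_cast (by omega : ¬ (m ≤ 1))
      simp only [List.foldl_cons, List.foldl_nil, if_neg h1]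
      obtain ⟨p, hp⟩ : ∃ p, m = p + 2 := ⟨m - 2, by omega⟩
      subst hp
      have e1 : p + 2 + 1 - 2 = p + 1 := by omega
      have e2 : p + 2 + 1 - 1 = p + 2 := by omega
      have e3 : p + 2 - 2 = p := by omega
      have e4 : p + 2 - 1 = p + 1 := by omega
      rw [e1, e2, e3, e4]
      show _ = (bsiDp steps_list (p + 1), bsiDp steps_list (p + 2))
      have : bsiDp steps_list (p + 2) =
          max (bsiDp steps_list (p + 1)) (bsiDp steps_list p) + PySem.List.pyGetD steps_list ((p : Int) + 2) 0 := rfl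
      rw [this]
      have hmax : max (bsiDp steps_list p) (bsiDp steps_list (p + 1)) =
          max (bsiDp steps_list (p + 1)) (bsiDp steps_list p) := max_comm _ _
      have hidx : ((p + 2 : Nat) : Int) = (p : Int) + 2 := by push_cast; ring
      simp [hmax, hidx]

lemma a_eq_fold (steps_list : List Int) (n : Int) :
    best_step_iterative steps_list n =
      ((PySem.List.pyRange 0 n 1).foldl (fun sl i =>
        if i ≤ 1 then
          (if i = 0 then (PySem.List.pyGetD steps_list i 0, sl.2)
           else (sl.1, PySem.List.pyGetD steps_list i 0))
        else
          let next_val := max sl.1 sl.2 + PySem.List.pyGetD steps_list i 0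
          (sl.2, next_val)) ((0 : Int), (0 : Int))).2 := rfl

theorem best_step_iterative_spec : Claim_unchanged_best_step_iterative := by
  intro steps_list n _ hpre
  unfold Spec_best_step_iterative
  intro hnd
  rcases lt_trichotomy n 1 with hn | hn | hn
  · -- n ≤ 0: both return 0
    rw [a_eq_fold, PySem.List.pyRange_one_eq_nil (by omega)]
    unfold best_step_iterative_alt
    rw [if_pos (by omega)]
    rfl
  · -- n = 1: A returns 0; ¬D_ forces steps_list.getD 0 0 = 0, so B returns 0 too
    subst hn
    have h0 : steps_list.getD 0 0 = 0 := by
      by_contra h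
      exact hnd ⟨rfl, h⟩
    rw [a_eq_fold, alt_eq_dp steps_list 1 le_rfl]
    have h1 : PySem.List.pyRange 0 1 1 = [0] := by decide
    rw [h1]
    show (0 : Int) = bsiDp steps_list ((1 : Int) - 1).toNat
    have : ((1 : Int) - 1).toNat = 0 := by omega
    rw [this]
    show (0 : Int) = PySem.List.pyGetD steps_list 0 0
    rw [PySem.List.pyGetD_zero, h0]
  · -- n ≥ 2: both equal dp (n-1)
    rw [a_eq_fold, alt_eq_dp steps_list n (by omega)]
    have hcast : ((n.toNat : Int)) = n := by omega
    rw [← hcast, a_fold steps_list n.toNat (by omega)]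
    have e : ((n.toNat : Int) - 1).toNat = n.toNat - 1 := by omega
    rw [e]

theorem best_step_iterative_tight : Claim_exact_best_step_iterative := by
  intro steps_list n _ hpre hd
  obtain ⟨hn, hne⟩ := hd
  subst hn
  rw [a_eq_fold, alt_eq_dp steps_list 1 le_rfl]
  have h1 : PySem.List.pyRange 0 1 1 = [0] := by decide
  rw [h1]
  show (0 : Int) ≠ bsiDp steps_list ((1 : Int) - 1).toNat
  have : ((1 : Int) - 1).toNat = 0 := by omega
  rw [this]
  show (0 : Int) ≠ PySem.List.pyGetD steps_list 0 0
  rw [PySem.List.pyGetD_zero]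
  exact fun h => hne h.symm

theorem best_step_iterative_changed : Claim_changed_best_step_iterative := by
  unfold Claim_changed_best_step_iterative; decide
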